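-- pv_equiv track=rewrite | github.com/AVUKU-PRAGATHESWARI/GeeksForGeeks | Move all negative elements to end.py | segregateElements
-- ===== SOURCE A (Python) =====
-- def segregateElements(arr, n):
--    # Your code goes here
--     ans=[]
--     ans.extend(arr)
--     arr.clear()
--     for num in ans:
--         if num>0:
--             arr.append(num)
--     for num in ans:
--         if num<0:
--             arr.append(num)
--     return arr
-- ===== SOURCE B (Python) =====
-- def segregateElements(arr, n):
--     pos = []
--     neg = []
--     for x in list(arr):
--         if x > 0:
--             pos.append(x)
--         elif x < 0:
--             neg.append(x)
--     arr[:] = pos + neg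
--     return arr
-- ===== Notes on version B (the rewrite author's own statement) =====
-- stated objective: simpler
-- what changed: One partition pass maintaining two buckets (pos/neg) and a single in-place overwrite, instead of A's two separate filter passes over a snapshot.
import Mathlib
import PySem

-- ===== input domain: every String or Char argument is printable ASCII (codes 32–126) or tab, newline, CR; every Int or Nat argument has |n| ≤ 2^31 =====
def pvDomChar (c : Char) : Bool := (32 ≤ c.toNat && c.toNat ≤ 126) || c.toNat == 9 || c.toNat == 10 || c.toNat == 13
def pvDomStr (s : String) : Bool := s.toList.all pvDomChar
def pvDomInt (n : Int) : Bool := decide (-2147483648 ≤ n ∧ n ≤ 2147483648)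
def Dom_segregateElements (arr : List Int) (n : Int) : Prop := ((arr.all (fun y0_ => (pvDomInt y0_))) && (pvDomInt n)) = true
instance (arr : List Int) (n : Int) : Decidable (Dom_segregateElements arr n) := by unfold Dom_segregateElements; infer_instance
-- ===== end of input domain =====

-- B partitions in one pass into two buckets and concatenates once; equivalence of
-- the RETURN value only (both Pythons mutate arr in place to the same contents).

-- ===== PORT A =====
-- ans = snapshot of arr; arr cleared; first loop appends positives, second appends negatives
def segregateElements (arr : List Int) (n : Int) : List Int :=
  let ans := arr
  let cleared : List Int := []
  let afterPos := ans.foldl (fun acc num => if num > 0 then acc ++ [num] else acc) cleared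
  let afterNeg := ans.foldl (fun acc num => if num < 0 then acc ++ [num] else acc) afterPos
  afterNeg

-- ===== PORT B =====
-- single pass building (pos, neg) buckets, then pos ++ neg
def segregateElements_alt (arr : List Int) (n : Int) : List Int :=
  let buckets := arr.foldl
    (fun (pn : List Int × List Int) x =>
      if x > 0 then (pn.1 ++ [x], pn.2)
      else if x < 0 then (pn.1, pn.2 ++ [x])
      else pn)
    ([], [])
  buckets.1 ++ buckets.2

-- ===== PRECONDITION & SPEC =====
def Spec_segregateElements (arr : List Int) (n : Int) (out : List Int) : Prop := out = segregateElements_alt arr n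
instance (arr : List Int) (n : Int) (out : List Int) : Decidable (Spec_segregateElements arr n out) := by unfold Spec_segregateElements; infer_instance

-- ===== CLAIM =====
def Claim_equal_segregateElements : Prop := ∀ (arr : List Int) (n : Int), Dom_segregateElements arr n → Spec_segregateElements arr n (segregateElements arr n)

-- ===== LEMMAS AND PROOFS =====

-- A's first loop computes acc ++ filter (· > 0)
theorem foldl_pos_eq (l acc : List Int) :
    l.foldl (fun acc num => if num > 0 then acc ++ [num] else acc) acc
      = acc ++ l.filter (fun x => decide (x > 0)) := by
  induction l generalizing acc with
  | nil => simp
  | cons h t ih =>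
    simp only [List.foldl_cons, List.filter_cons]
    by_cases hp : h > 0 <;> simp [hp, ih]

theorem foldl_neg_eq (l acc : List Int) :
    l.foldl (fun acc num => if num < 0 then acc ++ [num] else acc) acc
      = acc ++ l.filter (fun x => decide (x < 0)) := by
  induction l generalizing acc with
  | nil => simp
  | cons h t ih =>
    simp only [List.foldl_cons, List.filter_cons]
    by_cases hp : h < 0 <;> simp [hp, ih]

-- B's buckets fold computes the two filters
theorem foldl_buckets_eq (l : List Int) (p q : List Int) :
    l.foldl
      (fun (pn : List Int × List Int) x =>
        if x > 0 then (pn.1 ++ [x], pn.2)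
        else if x < 0 then (pn.1, pn.2 ++ [x])
        else pn)
      (p, q)
      = (p ++ l.filter (fun x => decide (x > 0)), q ++ l.filter (fun x => decide (x < 0))) := by
  induction l generalizing p q with
  | nil => simp
  | cons h t ih =>
    simp only [List.foldl_cons, List.filter_cons]
    by_cases hp : h > 0
    · have hn : ¬ h < 0 := by omega
      simp [hp, hn, ih]
    · by_cases hn : h < 0 <;> simp [hp, hn, ih]

-- ===== VERDICT =====
theorem segregateElements_spec : Claim_equal_segregateElements := by
  intro arr n _
  unfold Spec_segregateElements segregateElements segregateElements_alt
  simp only [foldl_pos_eq, foldl_neg_eq, foldl_buckets_eq, List.nil_append]
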